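-- pv_equiv track=rewrite | github.com/gabz11/CodigosBCC-2021 | Python/Trabalho - Sist. Ciber-físicos/Calculadora Base/main.py | HexParaBi
-- ===== SOURCE A (Python) =====
-- def HexParaBi(x):
--     x = str(x)
--     x = x.upper()
--     novo_numero = ""
--     for i in x:
--         if i == "0":
--             novo_numero = novo_numero + "0000"
--         elif i == "1":
--             novo_numero = novo_numero + "0001"
--         elif i == "2":
--             novo_numero = novo_numero + "0010"
--         elif i == "3":
--             novo_numero = novo_numero + "0011"
--         elif i == "4":
--             novo_numero = novo_numero + "0100"
--         elif i == "5":
--             novo_numero = novo_numero + "0101"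
--         elif i == "6":
--             novo_numero = novo_numero + "0110"
--         elif i == "7":
--             novo_numero = novo_numero + "0111"
--         elif i == "8":
--             novo_numero = novo_numero + "1000"
--         elif i == "9":
--             novo_numero = novo_numero + "1001"
--         elif i == "A":
--             novo_numero = novo_numero + "1010"
--         elif i == "B":
--             novo_numero = novo_numero + "1011"
--         elif i == "C":
--             novo_numero = novo_numero + "1100"
--         elif i == "D":
--             novo_numero = novo_numero + "1101"
--         elif i == "E":
--             novo_numero = novo_numero + "1110"
--         elif i == "F":
--             novo_numero = novo_numero + "1111"
--
--     return int(novo_numero)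
-- ===== SOURCE B (Python) =====
-- def HexParaBi(x):
--     x = str(x)
--     x = x.upper()
--     n = 0
--     k = 0
--     for c in x:
--         v = "0123456789ABCDEF".find(c)
--         if v >= 0:
--             n = n * 16 + v
--             k = k + 1
--     bits = ""
--     for _ in range(4 * k):
--         bits = str(n % 2) + bits
--         n = n // 2
--     return int(bits)
-- ===== Notes on version B (the rewrite author's own statement) =====
-- stated objective: alternative
-- what changed: Instead of concatenating a 4-character binary block per hex digit through a 16-branch if/elif chain, B accumulates the hex value as one integer n (and a digit count k) in a single pass and then reconstructs the binary-digit string from n by 4*k repeated divmod-by-2 steps; the final int() is reached exactly as in A, so an input with no hex digit raises the same ValueError via int("").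
-- outside the precondition, e.g. on HexParaBi(''): A raises ValueError, B raises ValueError
import Mathlib
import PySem

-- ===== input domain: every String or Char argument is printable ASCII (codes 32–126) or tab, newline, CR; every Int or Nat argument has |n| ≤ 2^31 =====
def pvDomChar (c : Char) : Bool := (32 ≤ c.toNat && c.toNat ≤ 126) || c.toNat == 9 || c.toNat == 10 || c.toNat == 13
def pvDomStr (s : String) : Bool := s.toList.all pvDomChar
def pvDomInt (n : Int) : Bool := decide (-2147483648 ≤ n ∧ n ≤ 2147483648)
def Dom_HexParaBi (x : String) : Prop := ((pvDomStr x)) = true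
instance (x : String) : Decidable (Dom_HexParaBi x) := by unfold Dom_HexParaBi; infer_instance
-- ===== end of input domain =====

-- B replaces A's per-character 4-bit-block string concatenation by one integer accumulator
-- (hex value n and digit count k) followed by 4*k divmod-by-2 steps that rebuild the binary
-- string; objective: alternative algorithm of similar cost, same values (and same ValueError).

-- ===== PORT A =====
def HexParaBi (x : String) : Int :=
  -- x = str(x) is the identity on a str argument
  let up := PySem.Chars.upper x.toList
  let novo := up.foldl (fun acc i =>
    if i = '0' then acc ++ ['0', '0', '0', '0']
    else if i = '1' then acc ++ ['0', '0', '0', '1']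
    else if i = '2' then acc ++ ['0', '0', '1', '0']
    else if i = '3' then acc ++ ['0', '0', '1', '1']
    else if i = '4' then acc ++ ['0', '1', '0', '0']
    else if i = '5' then acc ++ ['0', '1', '0', '1']
    else if i = '6' then acc ++ ['0', '1', '1', '0']
    else if i = '7' then acc ++ ['0', '1', '1', '1']
    else if i = '8' then acc ++ ['1', '0', '0', '0']
    else if i = '9' then acc ++ ['1', '0', '0', '1']
    else if i = 'A' then acc ++ ['1', '0', '1', '0']
    else if i = 'B' then acc ++ ['1', '0', '1', '1']
    else if i = 'C' then acc ++ ['1', '1', '0', '0']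
    else if i = 'D' then acc ++ ['1', '1', '0', '1']
    else if i = 'E' then acc ++ ['1', '1', '1', '0']
    else if i = 'F' then acc ++ ['1', '1', '1', '1']
    else acc) []
  -- int(novo_numero); none = ValueError, excluded by Pre_
  (PySem.Int.ofChars? novo).getD 0

-- ===== PORT B =====
def HexParaBi_alt (x : String) : Int :=
  let up := PySem.Chars.upper x.toList
  let nk := up.foldl (fun (p : Int × Int) c =>
    let v := PySem.Chars.find ['0', '1', '2', '3', '4', '5', '6', '7', '8', '9', 'A', 'B', 'C', 'D', 'E', 'F'] [c]
    if 0 ≤ v then (p.1 * 16 + v, p.2 + 1) else p) (0, 0)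
  let bn := (PySem.List.pyRange 0 (4 * nk.2) 1).foldl
    (fun (p : List Char × Int) _ =>
      (PySem.Int.toChars (PySem.Int.mod p.2 2) ++ p.1, PySem.Int.floordiv p.2 2))
    ([], nk.1)
  -- int(bits); none = ValueError, excluded by Pre_
  (PySem.Int.ofChars? bn.1).getD 0

-- ===== PRECONDITION & SPEC =====
-- Pre_ excludes exactly the inputs with no hex digit (after upper-casing): there both
-- Pythons raise ValueError (A via int(""), B via int("")).
def Pre_HexParaBi (x : String) : Prop :=
  ((PySem.Chars.upper x.toList).any (fun c => ['0', '1', '2', '3', '4', '5', '6', '7', '8', '9', 'A', 'B', 'C', 'D', 'E', 'F'].contains c)) = true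
instance (x : String) : Decidable (Pre_HexParaBi x) := by unfold Pre_HexParaBi; infer_instance
def pvWitness_HexParaBi : String := "1A"

def Spec_HexParaBi (x : String) (out : Int) : Prop := out = HexParaBi_alt x
instance (x : String) (out : Int) : Decidable (Spec_HexParaBi x out) := by unfold Spec_HexParaBi; infer_instance

-- ===== CLAIM (what is proved, stated in full; the proofs are below) =====
def Claim_equal_HexParaBi : Prop := ∀ (x : String), Dom_HexParaBi x → Pre_HexParaBi x → Spec_HexParaBi x (HexParaBi x)

-- ===== LEMMAS AND PROOFS =====

-- proof-side helpers
def hexL : List Char := ['0', '1', '2', '3', '4', '5', '6', '7', '8', '9', 'A', 'B', 'C', 'D', 'E', 'F']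

def bitc (z : Int) : Char := if z = 0 then '0' else '1'

def block4 (v : Int) : List Char := [bitc (v / 8 % 2), bitc (v / 4 % 2), bitc (v / 2 % 2), bitc (v % 2)]

def blockOf (c : Char) : List Char :=
  if c = '0' then ['0', '0', '0', '0']
  else if c = '1' then ['0', '0', '0', '1']
  else if c = '2' then ['0', '0', '1', '0']
  else if c = '3' then ['0', '0', '1', '1']
  else if c = '4' then ['0', '1', '0', '0']
  else if c = '5' then ['0', '1', '0', '1']
  else if c = '6' then ['0', '1', '1', '0']
  else if c = '7' then ['0', '1', '1', '1']
  else if c = '8' then ['1', '0', '0', '0']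
  else if c = '9' then ['1', '0', '0', '1']
  else if c = 'A' then ['1', '0', '1', '0']
  else if c = 'B' then ['1', '0', '1', '1']
  else if c = 'C' then ['1', '1', '0', '0']
  else if c = 'D' then ['1', '1', '0', '1']
  else if c = 'E' then ['1', '1', '1', '0']
  else if c = 'F' then ['1', '1', '1', '1']
  else []

def hvs (l : List Char) : List Int :=
  l.filterMap (fun c => if 0 ≤ PySem.Chars.find hexL [c] then some (PySem.Chars.find hexL [c]) else none)

def tob : Nat → Int → List Char
  | 0, _ => []
  | m + 1, n => tob m (PySem.Int.floordiv n 2) ++ PySem.Int.toChars (PySem.Int.mod n 2)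

-- A's loop body appends blockOf
set_option maxHeartbeats 2000000 in
theorem stepA_eq (acc : List Char) (i : Char) :
    (if i = '0' then acc ++ ['0', '0', '0', '0']
    else if i = '1' then acc ++ ['0', '0', '0', '1']
    else if i = '2' then acc ++ ['0', '0', '1', '0']
    else if i = '3' then acc ++ ['0', '0', '1', '1']
    else if i = '4' then acc ++ ['0', '1', '0', '0']
    else if i = '5' then acc ++ ['0', '1', '0', '1']
    else if i = '6' then acc ++ ['0', '1', '1', '0']
    else if i = '7' then acc ++ ['0', '1', '1', '1']
    else if i = '8' then acc ++ ['1', '0', '0', '0']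
    else if i = '9' then acc ++ ['1', '0', '0', '1']
    else if i = 'A' then acc ++ ['1', '0', '1', '0']
    else if i = 'B' then acc ++ ['1', '0', '1', '1']
    else if i = 'C' then acc ++ ['1', '1', '0', '0']
    else if i = 'D' then acc ++ ['1', '1', '0', '1']
    else if i = 'E' then acc ++ ['1', '1', '1', '0']
    else if i = 'F' then acc ++ ['1', '1', '1', '1']
    else acc) = acc ++ blockOf i := by
  unfold blockOf
  by_cases h0 : i = '0'
  · rw [if_pos h0, if_pos h0]
  rw [if_neg h0, if_neg h0]
  by_cases h1 : i = '1'
  · rw [if_pos h1, if_pos h1]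
  rw [if_neg h1, if_neg h1]
  by_cases h2 : i = '2'
  · rw [if_pos h2, if_pos h2]
  rw [if_neg h2, if_neg h2]
  by_cases h3 : i = '3'
  · rw [if_pos h3, if_pos h3]
  rw [if_neg h3, if_neg h3]
  by_cases h4 : i = '4'
  · rw [if_pos h4, if_pos h4]
  rw [if_neg h4, if_neg h4]
  by_cases h5 : i = '5'
  · rw [if_pos h5, if_pos h5]
  rw [if_neg h5, if_neg h5]
  by_cases h6 : i = '6'
  · rw [if_pos h6, if_pos h6]
  rw [if_neg h6, if_neg h6]
  by_cases h7 : i = '7'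
  · rw [if_pos h7, if_pos h7]
  rw [if_neg h7, if_neg h7]
  by_cases h8 : i = '8'
  · rw [if_pos h8, if_pos h8]
  rw [if_neg h8, if_neg h8]
  by_cases h9 : i = '9'
  · rw [if_pos h9, if_pos h9]
  rw [if_neg h9, if_neg h9]
  by_cases h10 : i = 'A'
  · rw [if_pos h10, if_pos h10]
  rw [if_neg h10, if_neg h10]
  by_cases h11 : i = 'B'
  · rw [if_pos h11, if_pos h11]
  rw [if_neg h11, if_neg h11]
  by_cases h12 : i = 'C'
  · rw [if_pos h12, if_pos h12]
  rw [if_neg h12, if_neg h12]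
  by_cases h13 : i = 'D'
  · rw [if_pos h13, if_pos h13]
  rw [if_neg h13, if_neg h13]
  by_cases h14 : i = 'E'
  · rw [if_pos h14, if_pos h14]
  rw [if_neg h14, if_neg h14]
  by_cases h15 : i = 'F'
  · rw [if_pos h15, if_pos h15]
  rw [if_neg h15, if_neg h15]
  exact (List.append_nil acc).symm

-- per-character bridge: A's block is B's block of the found hex value
theorem blockOf_eq (c : Char) : blockOf c = (hvs [c]).flatMap block4 := by
  by_cases h0 : c = '0'
  · subst h0; decide
  by_cases h1 : c = '1'
  · subst h1; decide
  by_cases h2 : c = '2'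
  · subst h2; decide
  by_cases h3 : c = '3'
  · subst h3; decide
  by_cases h4 : c = '4'
  · subst h4; decide
  by_cases h5 : c = '5'
  · subst h5; decide
  by_cases h6 : c = '6'
  · subst h6; decide
  by_cases h7 : c = '7'
  · subst h7; decide
  by_cases h8 : c = '8'
  · subst h8; decide
  by_cases h9 : c = '9'
  · subst h9; decide
  by_cases h10 : c = 'A'
  · subst h10; decide
  by_cases h11 : c = 'B'
  · subst h11; decide
  by_cases h12 : c = 'C'
  · subst h12; decide
  by_cases h13 : c = 'D'
  · subst h13; decide
  by_cases h14 : c = 'E'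
  · subst h14; decide
  by_cases h15 : c = 'F'
  · subst h15; decide
  have hm : c ∉ hexL := by simp [hexL]; tauto
  have hfind : PySem.Chars.find hexL [c] = -1 := by
    rw [PySem.Chars.find_eq_neg_one_iff]
    intro hinf
    exact hm (hinf.subset (List.mem_singleton_self c))
  simp [blockOf, hvs, hfind, h0, h1, h2, h3, h4, h5, h6, h7, h8, h9, h10, h11, h12, h13, h14, h15]

theorem hvs_cons (c : Char) (l : List Char) : hvs (c :: l) = hvs [c] ++ hvs l := by
  by_cases h : 0 ≤ PySem.Chars.find hexL [c] <;>
    simp [hvs, h]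

theorem flatMap_blockOf (l : List Char) : l.flatMap blockOf = (hvs l).flatMap block4 := by
  induction l with
  | nil => rfl
  | cons c l ih =>
    rw [List.flatMap_cons, hvs_cons, List.flatMap_append, blockOf_eq, ih]

theorem hvs_bounds (l : List Char) : ∀ v ∈ hvs l, 0 ≤ v ∧ v < 16 := by
  intro v hv
  simp only [hvs, List.mem_filterMap] at hv
  obtain ⟨c, -, hc⟩ := hv
  by_cases h : 0 ≤ PySem.Chars.find hexL [c]
  · rw [if_pos h, Option.some_inj] at hc
    subst hc
    refine ⟨h, ?_⟩
    by_contra hge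
    push Not at hge
    have hpre := (PySem.Chars.find_spec h).1
    have hdrop : List.drop (PySem.Chars.find hexL [c]).toNat hexL = [] := by
      apply List.drop_eq_nil_of_le
      have : (16:Int) ≤ PySem.Chars.find hexL [c] := hge
      have hlen : hexL.length = 16 := by decide
      omega
    rw [hdrop] at hpre
    exact List.cons_ne_nil _ _ (List.prefix_nil.mp hpre)
  · rw [if_neg h] at hc
    exact absurd hc (by simp)

-- B's first loop computes (foldl over hex values, count)
theorem loop1_eq (l : List Char) : ∀ (a k : Int),
    l.foldl (fun (p : Int × Int) c =>
      let v := PySem.Chars.find ['0', '1', '2', '3', '4', '5', '6', '7', '8', '9', 'A', 'B', 'C', 'D', 'E', 'F'] [c]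
      if 0 ≤ v then (p.1 * 16 + v, p.2 + 1) else p) (a, k)
    = ((hvs l).foldl (fun a v => a * 16 + v) a, k + (hvs l).length) := by
  induction l with
  | nil => simp [hvs]
  | cons c l ih =>
    intro a k
    by_cases h : 0 ≤ PySem.Chars.find hexL [c]
    · rw [List.foldl_cons, hvs_cons]
      simp only [hexL] at h
      simp only [h, List.foldl_append]
      rw [ih]
      simp [hvs, hexL, h]
      ring
    · rw [List.foldl_cons, hvs_cons]
      simp only [hexL] at h
      simp only [h]
      rw [ih]
      simp [hvs, hexL, h]

-- B's second loop builds tob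
theorem foldl_const_iterate {α β : Type} (g : β → β) (l : List α) : ∀ (s : β),
    l.foldl (fun p _ => g p) s = Nat.iterate g l.length s := by
  induction l with
  | nil => intro s; rfl
  | cons x l ih =>
    intro s
    rw [List.foldl_cons, ih, List.length_cons, Function.iterate_succ_apply]

theorem iter_tob (m : Nat) : ∀ (acc : List Char) (n : Int),
    Nat.iterate (fun (p : List Char × Int) =>
        (PySem.Int.toChars (PySem.Int.mod p.2 2) ++ p.1, PySem.Int.floordiv p.2 2)) m (acc, n)
    = (tob m n ++ acc, Nat.iterate (fun t => PySem.Int.floordiv t 2) m n) := by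
  induction m with
  | zero => intro acc n; simp [tob]
  | succ m ih =>
    intro acc n
    rw [Function.iterate_succ_apply, Function.iterate_succ_apply, ih]
    simp [tob]

theorem pyRange_len (m : Nat) : (PySem.List.pyRange 0 (m : Int) 1).length = m := by
  rw [PySem.List.pyRange_zero_natCast]
  simp

theorem loop2_eq (m : Nat) (acc : List Char) (n : Int) :
    ((PySem.List.pyRange 0 (m : Int) 1).foldl
      (fun (p : List Char × Int) _ =>
        (PySem.Int.toChars (PySem.Int.mod p.2 2) ++ p.1, PySem.Int.floordiv p.2 2))
      (acc, n)).1
    = tob m n ++ acc := by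
  rw [foldl_const_iterate, pyRange_len, iter_tob]

theorem tc_bit (z : Int) : PySem.Int.toChars (z % 2) = [bitc (z % 2)] := by
  rcases Int.emod_two_eq z with hz | hz <;> rw [hz] <;> rfl

theorem tob_succ (m : Nat) (n : Int) :
    tob (m + 1) n = tob m (PySem.Int.floordiv n 2) ++ PySem.Int.toChars (PySem.Int.mod n 2) := rfl

theorem tob_step (N v : Int) (hv0 : 0 ≤ v) (hv16 : v < 16) (L : Nat) :
    tob (4 * L + 4) (N * 16 + v) = tob (4 * L) N ++ block4 v := by
  have h2 : (0:Int) < 2 := by norm_num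
  have hfd : ∀ a : Int, PySem.Int.floordiv a 2 = a / 2 := fun a =>
    PySem.Int.floordiv_eq_ediv_of_pos h2
  have hmod : ∀ a : Int, PySem.Int.mod a 2 = a % 2 := fun a =>
    PySem.Int.mod_eq_emod_of_pos h2
  rw [show 4 * L + 4 = (4 * L + 3) + 1 by ring, tob_succ,
      show 4 * L + 3 = (4 * L + 2) + 1 by ring, tob_succ,
      show 4 * L + 2 = (4 * L + 1) + 1 by ring, tob_succ,
      tob_succ]
  simp only [hfd, hmod]
  have e1 : (N * 16 + v) / 2 = N * 8 + v / 2 := by omega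
  have e2 : (N * 8 + v / 2) / 2 = N * 4 + v / 4 := by omega
  have e3 : (N * 4 + v / 4) / 2 = N * 2 + v / 8 := by omega
  have e4 : (N * 2 + v / 8) / 2 = N := by omega
  have m1 : (N * 16 + v) % 2 = v % 2 := by omega
  have m2 : (N * 8 + v / 2) % 2 = v / 2 % 2 := by omega
  have m3 : (N * 4 + v / 4) % 2 = v / 4 % 2 := by omega
  have m4 : (N * 2 + v / 8) % 2 = v / 8 % 2 := by omega
  rw [e1, e2, e3, e4, m1, m2, m3, m4, tc_bit v, tc_bit (v / 2), tc_bit (v / 4), tc_bit (v / 8)]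
  simp [block4]

-- the main numeric fact: 4k divmod steps on the accumulated value rebuild the blocks
theorem tob_val (vs : List Int) (h : ∀ v ∈ vs, 0 ≤ v ∧ v < 16) :
    tob (4 * vs.length) (vs.foldl (fun a v => a * 16 + v) 0) = vs.flatMap block4 := by
  induction vs using List.reverseRecOn with
  | nil => rfl
  | append_singleton l v ih =>
    have hl : ∀ w ∈ l, 0 ≤ w ∧ w < 16 := fun w hw => h w (by simp [hw])
    have hv : 0 ≤ v ∧ v < 16 := h v (by simp)
    rw [List.foldl_append, List.foldl_cons, List.foldl_nil, List.flatMap_append,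
      List.length_append, ← ih hl]
    simp only [List.length_cons, List.length_nil, List.flatMap_cons, List.flatMap_nil,
      List.append_nil]
    rw [show 4 * (l.length + (0 + 1)) = 4 * l.length + 4 by ring]
    exact tob_step _ v hv.1 hv.2 _

theorem A_char (x : String) : HexParaBi x
    = (PySem.Int.ofChars? ((hvs (PySem.Chars.upper x.toList)).flatMap block4)).getD 0 := by
  unfold HexParaBi
  simp only []
  rw [show (fun acc i =>
    if i = '0' then acc ++ ['0', '0', '0', '0']
    else if i = '1' then acc ++ ['0', '0', '0', '1']
    else if i = '2' then acc ++ ['0', '0', '1', '0']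
    else if i = '3' then acc ++ ['0', '0', '1', '1']
    else if i = '4' then acc ++ ['0', '1', '0', '0']
    else if i = '5' then acc ++ ['0', '1', '0', '1']
    else if i = '6' then acc ++ ['0', '1', '1', '0']
    else if i = '7' then acc ++ ['0', '1', '1', '1']
    else if i = '8' then acc ++ ['1', '0', '0', '0']
    else if i = '9' then acc ++ ['1', '0', '0', '1']
    else if i = 'A' then acc ++ ['1', '0', '1', '0']
    else if i = 'B' then acc ++ ['1', '0', '1', '1']
    else if i = 'C' then acc ++ ['1', '1', '0', '0']
    else if i = 'D' then acc ++ ['1', '1', '0', '1']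
    else if i = 'E' then acc ++ ['1', '1', '1', '0']
    else if i = 'F' then acc ++ ['1', '1', '1', '1']
    else acc)
      = (fun (acc : List Char) c => acc ++ blockOf c) from
    funext fun acc => funext fun i => stepA_eq acc i]
  rw [PySem.List.foldl_append_eq_flatMap, List.nil_append, flatMap_blockOf]

theorem B_char (x : String) : HexParaBi_alt x
    = (PySem.Int.ofChars? (tob (4 * (hvs (PySem.Chars.upper x.toList)).length)
        ((hvs (PySem.Chars.upper x.toList)).foldl (fun a v => a * 16 + v) 0))).getD 0 := by
  unfold HexParaBi_alt
  simp only []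
  rw [loop1_eq]
  rw [show (4 : Int) * ((((hvs (PySem.Chars.upper x.toList)).foldl (fun a v => a * 16 + v) 0, (0 : Int) + ((hvs (PySem.Chars.upper x.toList)).length : Int))).2)
      = ((4 * (hvs (PySem.Chars.upper x.toList)).length : Nat) : Int) by push_cast; ring]
  rw [loop2_eq, List.append_nil]

-- ===== VERDICT (by name: the statement is the Claim_ definition above) =====
theorem HexParaBi_spec : Claim_equal_HexParaBi := by
  intro x _ _
  show HexParaBi x = HexParaBi_alt x
  rw [A_char, B_char, tob_val _ (hvs_bounds (PySem.Chars.upper x.toList))]
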